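-- pv_equiv track=rewrite | github.com/SyndicateGit/AdventOfCode2024 | Day21_2.py | numeric_directions
-- ===== SOURCE A (Python) =====
-- numeric_keypad = [["7", "8", "9"],
--                   ["4", "5", "6"],
--                   ["1", "2", "3"],
--                   [" ", "0", "A"]]
--
-- numeric_positions = {char: (x, y) for y, row in enumerate(numeric_keypad) for x, char in enumerate(row)}
--
-- def numeric_directions(input):
--     curr = numeric_positions["A"]
--     paths = [""]
--
--     for char in input:
--         col, row = numeric_positions[char]
--         diff_col, diff_row = col - curr[0], row - curr[1]
--         horizontal = ""
--         vertical = ""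
--
--         if diff_col > 0:
--             horizontal = ">" * diff_col
--         elif diff_col < 0:
--             horizontal = "<" * abs(diff_col)
--
--         if diff_row > 0:
--             vertical = "v" * diff_row
--         elif diff_row < 0:
--             vertical = "^" * abs(diff_row)
--
--         new_paths = []
--         # Check for gap and generate possible paths
--         if numeric_keypad[curr[1]][curr[0] + diff_col] == " ":
--             for path in paths:
--                 new_paths.append(path + vertical + horizontal + "A")
--         elif numeric_keypad[curr[1] + diff_row][curr[0]] == " ":
--             for path in paths:
--                 new_paths.append(path + horizontal + vertical + "A")
--         else:
--             for path in paths: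
--                 new_paths.append(path + horizontal + vertical + "A")
--                 if horizontal + vertical != vertical + horizontal:
--                     new_paths.append(path + vertical + horizontal + "A")
--
--         paths = new_paths
--         curr = (col, row)
--
--     return paths
-- ===== SOURCE B (Python) =====
-- numeric_keypad = [["7", "8", "9"],
--                   ["4", "5", "6"],
--                   ["1", "2", "3"],
--                   [" ", "0", "A"]]
--
-- numeric_positions = {char: (x, y) for y, row in enumerate(numeric_keypad) for x, char in enumerate(row)}
--
-- def numeric_directions(input):
--     # Pass 1: per-character candidate move strings (1 or 2 options each).
--     options = []
--     curr = numeric_positions["A"]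
--     for char in input:
--         col, row = numeric_positions[char]
--         diff_col, diff_row = col - curr[0], row - curr[1]
--         horizontal = ">" * diff_col if diff_col > 0 else "<" * (-diff_col)
--         vertical = "v" * diff_row if diff_row > 0 else "^" * (-diff_row)
--         if numeric_keypad[curr[1]][col] == " ":
--             opts = [vertical + horizontal + "A"]
--         elif numeric_keypad[row][curr[0]] == " ":
--             opts = [horizontal + vertical + "A"]
--         elif horizontal + vertical != vertical + horizontal:
--             opts = [horizontal + vertical + "A", vertical + horizontal + "A"]
--         else:
--             opts = [horizontal + vertical + "A"]
--         options.append(opts)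
--         curr = (col, row)
--
--     # Pass 2: cartesian product, built suffix-first by recursion.
--     def expand(i):
--         if i == len(options):
--             return [""]
--         rest = expand(i + 1)
--         return [opt + tail for opt in options[i] for tail in rest]
--
--     return expand(0)
-- ===== Notes on version B (the rewrite author's own statement) =====
-- stated objective: alternative
-- what changed: B first computes, in one left-to-right pass, the one- or two-element list of candidate move-strings for each input character, then assembles the result as a suffix-first recursive cartesian product of those option lists, instead of A's per-character rebuild of the entire growing path list.
import Mathlib
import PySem

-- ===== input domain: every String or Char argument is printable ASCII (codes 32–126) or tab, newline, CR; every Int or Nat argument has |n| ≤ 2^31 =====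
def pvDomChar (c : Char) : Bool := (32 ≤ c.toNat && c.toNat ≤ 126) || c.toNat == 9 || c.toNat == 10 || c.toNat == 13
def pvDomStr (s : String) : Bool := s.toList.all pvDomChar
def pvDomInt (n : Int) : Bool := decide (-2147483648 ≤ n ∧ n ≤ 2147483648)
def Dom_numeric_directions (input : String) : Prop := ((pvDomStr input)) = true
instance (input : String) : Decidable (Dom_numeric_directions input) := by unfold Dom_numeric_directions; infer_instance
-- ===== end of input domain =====

-- B is an alternative decomposition: one pass computing per-character option lists, then a
-- recursive cartesian product, instead of A's growing-accumulator rebuild of all paths per character.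

-- ===== PORT A =====
-- (strings are carried as List Char per PySem convention; String.ofList at the end)
def numericKeypad : List (List Char) :=
  [['7', '8', '9'], ['4', '5', '6'], ['1', '2', '3'], [' ', '0', 'A']]

def numericPositions : PySem.Dict Char (Int × Int) :=
  PySem.Dict.ofList ((PySem.List.enumerate numericKeypad).flatMap
    (fun yrow => (PySem.List.enumerate yrow.2).map (fun xchar => (xchar.2, (xchar.1, yrow.1)))))

-- loop body of A ('for char in input': state = (curr, paths)); KeyError chars are outside Pre_,
-- getD defaults are never consulted inside Pre_
def aStep (st : (Int × Int) × List (List Char)) (char : Char) : (Int × Int) × List (List Char) :=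
  let curr := st.1
  let paths := st.2
  let cr := numericPositions.getD char (0, 0)
  let diff_col := cr.1 - curr.1
  let diff_row := cr.2 - curr.2
  let horizontal : List Char :=
    if diff_col > 0 then PySem.List.pyRepeat ['>'] diff_col
    else if diff_col < 0 then PySem.List.pyRepeat ['<'] |diff_col| else []
  let vertical : List Char :=
    if diff_row > 0 then PySem.List.pyRepeat ['v'] diff_row
    else if diff_row < 0 then PySem.List.pyRepeat ['^'] |diff_row| else []
  let new_paths : List (List Char) :=
    if PySem.List.pyGetD (PySem.List.pyGetD numericKeypad curr.2 []) (curr.1 + diff_col) 'x' = ' ' then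
      paths.foldl (fun np path => np ++ [path ++ vertical ++ horizontal ++ ['A']]) []
    else if PySem.List.pyGetD (PySem.List.pyGetD numericKeypad (curr.2 + diff_row) []) curr.1 'x' = ' ' then
      paths.foldl (fun np path => np ++ [path ++ horizontal ++ vertical ++ ['A']]) []
    else
      paths.foldl (fun np path =>
        let np1 := np ++ [path ++ horizontal ++ vertical ++ ['A']]
        if horizontal ++ vertical ≠ vertical ++ horizontal then
          np1 ++ [path ++ vertical ++ horizontal ++ ['A']]
        else np1) []
  (cr, new_paths)

def numeric_directions (input : String) : List String :=
  ((input.toList.foldl aStep (numericPositions.getD 'A' (0, 0), [[]])).2).map String.ofList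

-- ===== PORT B =====
-- loop body of B's first pass: candidate option strings for one character
def bOpts (curr : Int × Int) (char : Char) : (Int × Int) × List (List Char) :=
  let cr := numericPositions.getD char (0, 0)
  let diff_col := cr.1 - curr.1
  let diff_row := cr.2 - curr.2
  let horizontal : List Char :=
    if diff_col > 0 then PySem.List.pyRepeat ['>'] diff_col
    else PySem.List.pyRepeat ['<'] (-diff_col)
  let vertical : List Char :=
    if diff_row > 0 then PySem.List.pyRepeat ['v'] diff_row
    else PySem.List.pyRepeat ['^'] (-diff_row)
  let opts : List (List Char) :=
    if PySem.List.pyGetD (PySem.List.pyGetD numericKeypad curr.2 []) cr.1 'x' = ' ' then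
      [vertical ++ horizontal ++ ['A']]
    else if PySem.List.pyGetD (PySem.List.pyGetD numericKeypad cr.2 []) curr.1 'x' = ' ' then
      [horizontal ++ vertical ++ ['A']]
    else if horizontal ++ vertical ≠ vertical ++ horizontal then
      [horizontal ++ vertical ++ ['A'], vertical ++ horizontal ++ ['A']]
    else
      [horizontal ++ vertical ++ ['A']]
  (cr, opts)

-- B's second pass: 'expand(i)' — suffix-first recursive cartesian product
def bExpand : List (List (List Char)) → List (List Char)
  | [] => [[]]
  | opts :: rest =>
    let tails := bExpand rest
    opts.flatMap (fun o => tails.map (fun t => o ++ t))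

def numeric_directions_alt (input : String) : List String :=
  let fin := input.toList.foldl
    (fun (st : (Int × Int) × List (List (List Char))) char =>
      let r := bOpts st.1 char
      (r.1, st.2 ++ [r.2]))
    (numericPositions.getD 'A' (0, 0), [])
  (bExpand fin.2).map String.ofList

-- ===== PRECONDITION & SPEC =====
-- Pre_ excludes exactly the inputs containing a character that is not a numeric-keypad key,
-- on which Python A raises KeyError.
def Pre_numeric_directions (input : String) : Prop :=
  (input.toList.all
    (fun c => c ∈ ['0', '1', '2', '3', '4', '5', '6', '7', '8', '9', 'A', ' '])) = true
instance (input : String) : Decidable (Pre_numeric_directions input) := by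
  unfold Pre_numeric_directions; infer_instance
def pvWitness_numeric_directions : String := "029A"

def Spec_numeric_directions (input : String) (out : List String) : Prop := out = numeric_directions_alt input
instance (input : String) (out : List String) : Decidable (Spec_numeric_directions input out) := by unfold Spec_numeric_directions; infer_instance

-- ===== CLAIM (what is proved, stated in full; the proofs are below) =====
def Claim_equal_numeric_directions : Prop := ∀ (input : String), Dom_numeric_directions input → Pre_numeric_directions input → Spec_numeric_directions input (numeric_directions input)

-- ===== LEMMAS AND PROOFS =====

-- A's per-character step rebuilds the path list: it equals gluing B's options onto every path.
-- '"<" * abs(d)' in the d ≤ 0 branches of A equals B's '"<" * (-d)' form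
theorem repAbs (d : Int) (c c' : Char) :
    (if d > 0 then PySem.List.pyRepeat [c] d
     else if d < 0 then PySem.List.pyRepeat [c'] |d| else ([] : List Char))
    = (if d > 0 then PySem.List.pyRepeat [c] d else PySem.List.pyRepeat [c'] (-d)) := by
  split_ifs with h1 h2
  · rfl
  · rw [abs_of_neg h2]
  · have h0 : -d = 0 := by omega
    simp [h0, PySem.List.pyRepeat_singleton]

-- A's branch-wise path rebuild, for arbitrary gap conditions and move strings,
-- equals gluing B's option list onto every path.
theorem stepPaths (paths : List (List Char)) (g1 g2 : Prop) [Decidable g1] [Decidable g2]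
    (H V : List Char) :
    (if g1 then paths.foldl (fun np p => np ++ [p ++ V ++ H ++ ['A']]) []
     else if g2 then paths.foldl (fun np p => np ++ [p ++ H ++ V ++ ['A']]) []
     else paths.foldl (fun np p =>
        if H ++ V ≠ V ++ H then (np ++ [p ++ H ++ V ++ ['A']]) ++ [p ++ V ++ H ++ ['A']]
        else np ++ [p ++ H ++ V ++ ['A']]) []) =
    paths.flatMap (fun p =>
      (if g1 then [V ++ H ++ ['A']]
       else if g2 then [H ++ V ++ ['A']]
       else if H ++ V ≠ V ++ H then [H ++ V ++ ['A'], V ++ H ++ ['A']]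
       else [H ++ V ++ ['A']]).map (p ++ ·)) := by
  split_ifs with h1 h2 hc <;> simp [List.flatMap_def, List.append_assoc]

theorem aStep_eq (curr : Int × Int) (paths : List (List Char)) (char : Char) :
    aStep (curr, paths) char =
      ((bOpts curr char).1, paths.flatMap (fun p => (bOpts curr char).2.map (p ++ ·))) := by
  dsimp only [aStep, bOpts]
  simp only [repAbs, show ∀ a b : Int, a + (b - a) = b from fun a b => by ring]
  congr 1
  exact stepPaths paths _ _ _ _

def optsFrom : (Int × Int) → List Char → List (List (List Char))
  | _, [] => []
  | curr, c :: cs => (bOpts curr c).2 :: optsFrom (bOpts curr c).1 cs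

theorem b_fold (chars : List Char) : ∀ (curr : Int × Int) (acc : List (List (List Char))),
    (chars.foldl
      (fun (st : (Int × Int) × List (List (List Char))) char =>
        let r := bOpts st.1 char
        (r.1, st.2 ++ [r.2]))
      (curr, acc)).2 = acc ++ optsFrom curr chars := by
  induction chars with
  | nil => intro curr acc; simp [optsFrom]
  | cons c cs ih => intro curr acc; simp [optsFrom, List.foldl_cons, ih]

theorem a_fold (chars : List Char) : ∀ (curr : Int × Int) (paths : List (List Char)),
    (chars.foldl aStep (curr, paths)).2 =
      paths.flatMap (fun p => (bExpand (optsFrom curr chars)).map (p ++ ·)) := by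
  induction chars with
  | nil => intro curr paths; simp [optsFrom, bExpand]
  | cons c cs ih =>
    intro curr paths
    rw [List.foldl_cons, aStep_eq, ih]
    simp only [optsFrom, bExpand, List.flatMap_assoc, List.flatMap_map, List.map_flatMap,
      List.map_map, Function.comp_def, List.append_assoc]

-- ===== VERDICT (by name: the statement is the Claim_ definition above) =====
theorem numeric_directions_spec : Claim_equal_numeric_directions := by
  intro input _ _
  unfold Spec_numeric_directions numeric_directions numeric_directions_alt
  rw [a_fold]
  simp only []
  rw [b_fold]
  simp
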